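-- pv_equiv track=rewrite | github.com/nareohanyan/SmartRest_AI-Agent | app/agent/parser_normalization.py | count_term_hits
-- ===== SOURCE A (Python) =====
-- def count_term_hits(normalized_question: str, tokens: set[str], terms: set[str]) -> int:
--     hits = 0
--     for term in terms:
--         if " " in term:
--             if term in normalized_question:
--                 hits += 1
--             continue
--         if term in tokens or any(token.startswith(term) for token in tokens):
--             hits += 1
--     return hits
-- ===== SOURCE B (Python) =====
-- def count_term_hits(normalized_question: str, tokens: set[str], terms: set[str]) -> int:
--     # Build the set of ALL prefixes of all tokens once; then each space-free
--     # term is a hit iff it is in that set (a token equal to the term is its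
--     # own prefix, so A's "term in tokens" disjunct is absorbed).
--     prefixes = set()
--     for token in tokens:
--         for i in range(len(token) + 1):
--             prefixes.add(token[:i])
--     hits = 0
--     for term in terms:
--         if " " in term:
--             if term in normalized_question:
--                 hits += 1
--         elif term in prefixes:
--             hits += 1
--     return hits
-- ===== Notes on version B (the rewrite author's own statement) =====
-- stated objective: faster
-- what changed: Instead of scanning all tokens per term with startswith, B builds the set of all token prefixes once and answers each space-free term by a single hash-set membership test; the redundant 'term in tokens' disjunct (absorbed by startswith) disappears.
import Mathlib
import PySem

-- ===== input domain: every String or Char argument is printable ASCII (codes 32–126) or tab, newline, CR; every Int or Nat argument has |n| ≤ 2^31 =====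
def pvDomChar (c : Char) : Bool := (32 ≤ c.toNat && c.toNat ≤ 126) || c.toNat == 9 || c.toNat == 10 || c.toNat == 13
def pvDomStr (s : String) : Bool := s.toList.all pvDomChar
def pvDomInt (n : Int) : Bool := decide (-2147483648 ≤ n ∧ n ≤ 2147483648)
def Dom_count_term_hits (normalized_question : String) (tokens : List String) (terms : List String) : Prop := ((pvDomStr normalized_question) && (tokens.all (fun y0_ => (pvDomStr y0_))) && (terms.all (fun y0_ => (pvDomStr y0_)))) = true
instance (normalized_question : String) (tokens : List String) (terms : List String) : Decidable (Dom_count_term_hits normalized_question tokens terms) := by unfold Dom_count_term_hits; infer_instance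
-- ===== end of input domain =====

-- B builds the set of all token prefixes once, then answers each space-free term by one
-- set-membership test (faster when many terms are checked against the same tokens).

-- ===== PORT A =====
def count_term_hits (normalized_question : String) (tokens : List String) (terms : List String) : Int :=
  terms.foldl (fun hits term =>
    if PySem.Str.isIn " " term then
      (if PySem.Str.isIn term normalized_question then hits + 1 else hits)
    else
      if term ∈ tokens || tokens.any (fun token => PySem.Str.startswith token term) then
        hits + 1
      else
        hits) 0

-- ===== PORT B =====
-- prefixes = set();  for token in tokens: for i in range(len(token)+1): prefixes.add(token[:i])
def pvPrefixes (tokens : List String) : PySem.Set String :=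
  tokens.foldl (fun pfx token =>
    (PySem.List.pyRange 0 ((PySem.Str.len token : Int) + 1) 1).foldl
      (fun pfx i => PySem.Set.add pfx (PySem.Str.slice token none (some i))) pfx)
    PySem.Set.empty

def count_term_hits_alt (normalized_question : String) (tokens : List String) (terms : List String) : Int :=
  let prefixes := pvPrefixes tokens
  terms.foldl (fun hits term =>
    if PySem.Str.isIn " " term then
      (if PySem.Str.isIn term normalized_question then hits + 1 else hits)
    else
      if PySem.Set.contains prefixes term then hits + 1 else hits) 0

-- ===== PRECONDITION & SPEC =====
def Spec_count_term_hits (normalized_question : String) (tokens : List String) (terms : List String) (out : Int) : Prop := out = count_term_hits_alt normalized_question tokens terms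
instance (normalized_question : String) (tokens : List String) (terms : List String) (out : Int) : Decidable (Spec_count_term_hits normalized_question tokens terms out) := by unfold Spec_count_term_hits; infer_instance

-- ===== CLAIM (what is proved, stated in full; the proofs are below) =====
def Claim_equal_count_term_hits : Prop := ∀ (normalized_question : String) (tokens : List String) (terms : List String), Dom_count_term_hits normalized_question tokens terms → Spec_count_term_hits normalized_question tokens terms (count_term_hits normalized_question tokens terms)

-- ===== LEMMAS AND PROOFS =====

-- generic: folding Set.add over a list membership
theorem mem_foldl_set_add {α β : Type} [BEq α] [LawfulBEq α] (l : List β) (f : β → α)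
    (s : PySem.Set α) (x : α) :
    (x ∈ l.foldl (fun s b => PySem.Set.add s (f b)) s) ↔ x ∈ s ∨ ∃ b ∈ l, x = f b := by
  induction l generalizing s with
  | nil => simp
  | cons hd tl ih =>
    simp only [List.foldl_cons, ih, PySem.Set.mem_add, List.mem_cons]
    constructor
    · rintro ((h | h) | ⟨b, hb, rfl⟩)
      · exact Or.inl h
      · exact Or.inr ⟨hd, Or.inl rfl, h⟩
      · exact Or.inr ⟨b, Or.inr hb, rfl⟩
    · rintro (h | ⟨b, (rfl | hb), rfl⟩)
      · exact Or.inl (Or.inl h)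
      · exact Or.inl (Or.inr rfl)
      · exact Or.inr ⟨b, hb, rfl⟩

theorem mem_inner (token : String) (x : String) (s : PySem.Set String) :
    (x ∈ (PySem.List.pyRange 0 ((PySem.Str.len token : Int) + 1) 1).foldl
        (fun s i => PySem.Set.add s (PySem.Str.slice token none (some i))) s) ↔
    x ∈ s ∨ x.toList <+: token.toList := by
  rw [mem_foldl_set_add]
  simp only [PySem.List.mem_pyRange_one]
  constructor
  · rintro (h | ⟨i, ⟨h0, hlt⟩, rfl⟩)
    · exact Or.inl h
    · have : (PySem.Str.slice token none (some i)).toList = token.toList.take i.toNat := by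
        simp [PySem.Str.slice, PySem.Chars.slice_eq_listSlice, PySem.List.slice_to _ h0]
      rw [this]
      exact Or.inr (List.take_prefix _ _)
  · rintro (h | h)
    · exact Or.inl h
    · refine Or.inr ⟨(x.toList.length : Int), ⟨by positivity, ?_⟩, ?_⟩
      · have := h.length_le
        simp only [PySem.Str.len]
        omega
      · have hx : x.toList = token.toList.take x.toList.length := by
          rw [List.prefix_iff_eq_take] at h; exact h
        apply String.ext
        have : (PySem.Str.slice token none (some (x.toList.length : Int))).toList
            = token.toList.take x.toList.length := by
          simp [PySem.Str.slice, PySem.Chars.slice_eq_listSlice, PySem.List.slice_to]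
        simpa [String.toList] using hx.trans this.symm

theorem mem_pvPrefixes_aux (tokens : List String) (x : String) (s : PySem.Set String) :
    (x ∈ tokens.foldl (fun pfx token =>
      (PySem.List.pyRange 0 ((PySem.Str.len token : Int) + 1) 1).foldl
        (fun pfx i => PySem.Set.add pfx (PySem.Str.slice token none (some i))) pfx) s) ↔
    x ∈ s ∨ ∃ token ∈ tokens, x.toList <+: token.toList := by
  induction tokens generalizing s with
  | nil => simp
  | cons hd tl ih =>
    simp only [List.foldl_cons, ih, mem_inner, List.mem_cons]
    constructor
    · rintro ((h | h) | ⟨t, ht, hp⟩)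
      · exact Or.inl h
      · exact Or.inr ⟨hd, Or.inl rfl, h⟩
      · exact Or.inr ⟨t, Or.inr ht, hp⟩
    · rintro (h | ⟨t, (rfl | ht), hp⟩)
      · exact Or.inl (Or.inl h)
      · exact Or.inl (Or.inr hp)
      · exact Or.inr ⟨t, ht, hp⟩

theorem mem_pvPrefixes (tokens : List String) (x : String) :
    x ∈ pvPrefixes tokens ↔ ∃ token ∈ tokens, x.toList <+: token.toList := by
  unfold pvPrefixes
  rw [mem_pvPrefixes_aux]
  simp [PySem.Set.empty]

theorem cond_iff (tokens : List String) (term : String) :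
    (term ∈ tokens ∨ ∃ x ∈ tokens, PySem.Chars.startswith x.toList term.toList = true) ↔
      term ∈ pvPrefixes tokens := by
  rw [mem_pvPrefixes]
  constructor
  · rintro (h | ⟨t, ht, hs⟩)
    · exact ⟨term, h, List.prefix_refl _⟩
    · exact ⟨t, ht, (PySem.Chars.startswith_iff _ _).mp hs⟩
  · rintro ⟨t, ht, hp⟩
    exact Or.inr ⟨t, ht, (PySem.Chars.startswith_iff t.toList term.toList).mpr hp⟩

-- ===== VERDICT (by name: the statement is the Claim_ definition above) =====
theorem count_term_hits_spec : Claim_equal_count_term_hits := by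
  intro q tokens terms _
  unfold Spec_count_term_hits count_term_hits count_term_hits_alt
  apply PySem.List.foldl_congr_mem
  intro hits term _
  by_cases hsp : PySem.Chars.isIn [' '] term.toList = true
  · simp [hsp]
  · simp [hsp, cond_iff]
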